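-- pv_equiv track=rewrite | github.com/jjun-ni/PS | IN/WEEK12/Programmers불량사용자_TIN.py | select_user
-- ===== SOURCE A (Python) =====
-- def select_user(selected_user, ban, match_num):
--     res = set()
--     if ban == len(match_num):
--         tmp = tuple(sorted(selected_user))
--         res.add(tmp)
--         return res
--     for user in match_num[ban]:
--         if user in selected_user:
--             continue
--         else:
--             selected_user.append(user)
--             res |= select_user(selected_user, ban+1, match_num)
--             selected_user.pop()
--     return res
-- ===== SOURCE B (Python) =====
-- def select_user(selected_user, ban, match_num):
--     partials = [list(selected_user)]
--     for group in match_num[ban:]: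
--         partials = [p + [u] for p in partials for u in group if u not in p]
--     return {tuple(sorted(p)) for p in partials}
-- ===== Notes on version B (the rewrite author's own statement) =====
-- stated objective: simpler
-- what changed: Replaces A's mutating backtracking recursion (append/recurse/pop with per-level set unions) by an iterative fold that extends all partial selections one pattern-group at a time over match_num[ban:], deduplicating the sorted tuples once at the end.
-- outside the precondition, e.g. on select_user(['a'], -1, [['b'], ['c']]): A returns set(), B returns {('a', 'c')}; on select_user([], 2, [['a']]): A raises IndexError, B returns {()}
import Mathlib
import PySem

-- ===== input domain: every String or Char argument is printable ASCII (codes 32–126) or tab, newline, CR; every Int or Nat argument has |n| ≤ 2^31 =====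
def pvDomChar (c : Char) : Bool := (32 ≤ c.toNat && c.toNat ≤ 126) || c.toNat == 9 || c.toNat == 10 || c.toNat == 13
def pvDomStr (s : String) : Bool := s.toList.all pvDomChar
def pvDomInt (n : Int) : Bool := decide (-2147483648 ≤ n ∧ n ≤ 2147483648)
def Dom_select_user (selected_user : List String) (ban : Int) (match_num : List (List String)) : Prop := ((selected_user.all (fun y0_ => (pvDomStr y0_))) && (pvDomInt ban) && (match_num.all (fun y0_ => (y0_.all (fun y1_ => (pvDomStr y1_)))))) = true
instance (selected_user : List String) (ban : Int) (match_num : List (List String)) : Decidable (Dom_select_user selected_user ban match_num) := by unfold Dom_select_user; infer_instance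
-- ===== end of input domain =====

-- B rebuilds the result iteratively (a fold of one-step extensions over match_num[ban:], then one dedup of
-- the sorted tuples) instead of A's mutating backtracking recursion; objective: simpler. Return values only:
-- A transiently appends/pops on selected_user but always restores it, so no net mutation is observable.

-- ===== PORT A =====
-- fuel makes A's recursion (on the Int index ban) structural; 2*len+1 bounds the recursion depth
-- len(match_num) - ban on every input where A's Python returns, so the 0-fuel branch is never reached there.
def pvSelGo (fuel : Nat) (sel : List String) (ban : Int) (mn : List (List String)) : List (List String) :=
  match fuel with
  | 0 => []
  | fuel + 1 =>
    if ban = (mn.length : Int) then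
      PySem.Set.add PySem.Set.empty (PySem.List.sorted sel (fun x => x) false)
    else
      match PySem.List.pyGet? mn ban with
      | none => []  -- IndexError in Python; excluded by Pre_select_user
      | some group =>
        group.foldl
          (fun res user =>
            if sel.contains user then res
            else PySem.Set.union res (pvSelGo fuel (sel ++ [user]) (ban + 1) mn))
          PySem.Set.empty

def select_user (selected_user : List String) (ban : Int) (match_num : List (List String)) : List (List String) :=
  pvSelGo (2 * match_num.length + 1) selected_user ban match_num

-- ===== PORT B =====
def select_user_alt (selected_user : List String) (ban : Int) (match_num : List (List String)) : List (List String) :=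
  let partials :=
    (PySem.List.slice match_num (some ban) none).foldl
      (fun ps group => ps.flatMap (fun p => (group.filter (fun u => !p.contains u)).map (fun u => p ++ [u])))
      [selected_user]
  PySem.Set.ofList (partials.map (fun p => PySem.List.sorted p (fun x => x) false))

-- ===== PRECONDITION & SPEC =====
-- Pre_ restricts to the function's natural domain 0 ≤ ban ≤ len(match_num): for ban > len or ban < -len A
-- raises IndexError, and for -len ≤ ban < 0 A returns a value only via accidental negative-index wraparound.
def Pre_select_user (selected_user : List String) (ban : Int) (match_num : List (List String)) : Prop :=
  0 ≤ ban ∧ ban ≤ (match_num.length : Int)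
instance (selected_user : List String) (ban : Int) (match_num : List (List String)) : Decidable (Pre_select_user selected_user ban match_num) := by unfold Pre_select_user; infer_instance

def pvWitness_select_user : List String × Int × List (List String) := (["a"], 0, [["b"], ["a", "c"]])

def Spec_select_user (selected_user : List String) (ban : Int) (match_num : List (List String)) (out : List (List String)) : Prop := out = select_user_alt selected_user ban match_num
instance (selected_user : List String) (ban : Int) (match_num : List (List String)) (out : List (List String)) : Decidable (Spec_select_user selected_user ban match_num out) := by unfold Spec_select_user; infer_instance

-- ===== CLAIM (what is proved, stated in full; the proofs are below) =====
def Claim_equal_select_user : Prop := ∀ (selected_user : List String) (ban : Int) (match_num : List (List String)), Dom_select_user selected_user ban match_num → Pre_select_user selected_user ban match_num → Spec_select_user selected_user ban match_num (select_user selected_user ban match_num)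

-- ===== LEMMAS AND PROOFS =====

-- the tree of candidate selections, in A's depth-first (= B's fold) order
def pvProd (sel : List String) : List (List String) → List (List String)
  | [] => [sel]
  | g :: gs => (g.filter (fun u => !sel.contains u)).flatMap (fun u => pvProd (sel ++ [u]) gs)

theorem pv_union_ofList (xs ys : List (List String)) :
    PySem.Set.union (PySem.Set.ofList xs) (PySem.Set.ofList ys) = PySem.Set.ofList (xs ++ ys) := by
  show PySem.Set.update (PySem.Set.ofList xs) (PySem.Set.ofList ys) = _
  rw [PySem.Set.ofList_append, PySem.Set.update_eq_append_filter, PySem.Set.update_eq_append_filter,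
    PySem.Set.ofList_ofList]

theorem pv_loop (g : List String) : ∀ (sel : List String) (L : String → List (List String))
    (acc : List (List String)),
    g.foldl (fun res u => if sel.contains u then res else PySem.Set.union res (PySem.Set.ofList (L u)))
      (PySem.Set.ofList acc)
    = PySem.Set.ofList (acc ++ (g.filter (fun u => !sel.contains u)).flatMap L) := by
  induction g with
  | nil => intro sel L acc; simp
  | cons u g ih =>
    intro sel L acc
    simp only [List.foldl_cons, List.filter_cons]
    cases hc : sel.contains u with
    | true => simpa [hc] using ih sel L acc
    | false =>
      simp only [Bool.not_false, if_true, if_false, Bool.false_eq_true, pv_union_ofList]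
      rw [ih sel L (acc ++ L u)]
      simp

theorem pv_A_char (gs : List (List String)) : ∀ (fuel : Nat) (sel : List String) (ban : Int)
    (mn : List (List String)), 0 ≤ ban → ban ≤ (mn.length : Int) → mn.drop ban.toNat = gs →
    gs.length < fuel →
    pvSelGo fuel sel ban mn
      = PySem.Set.ofList ((pvProd sel gs).map (fun p => PySem.List.sorted p (fun x => x) false)) := by
  induction gs with
  | nil =>
    intro fuel sel ban mn h0 h1 hd hf
    have hlen : mn.length ≤ ban.toNat := by
      have := List.drop_eq_nil_iff.mp hd; omega
    have hban : ban = (mn.length : Int) := by omega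
    match fuel, hf with
    | fuel + 1, _ =>
      simp [pvSelGo, hban, pvProd, PySem.Set.add, PySem.Set.empty, PySem.Set.ofList]
  | cons g gs ih =>
    intro fuel sel ban mn h0 h1 hd hf
    have hlt : ban.toNat < mn.length := by
      by_contra h
      rw [List.drop_eq_nil_iff.mpr (by omega)] at hd
      simp at hd
    have hban : ¬ ban = (mn.length : Int) := by omega
    have hget : PySem.List.pyGet? mn ban = some g := by
      rw [PySem.List.pyGet?_of_nonneg mn h0, ← List.head?_drop, hd]; rfl
    have hd' : mn.drop (ban + 1).toNat = gs := by
      have : (ban + 1).toNat = ban.toNat + 1 := by omega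
      rw [this, ← List.drop_drop (j := ban.toNat) (i := 1), hd, List.drop_one, List.tail_cons]
    match fuel, hf with
    | fuel + 1, hf =>
      have hrec : ∀ u, pvSelGo fuel (sel ++ [u]) (ban + 1) mn
          = PySem.Set.ofList ((pvProd (sel ++ [u]) gs).map (fun p => PySem.List.sorted p (fun x => x) false)) := by
        intro u
        exact ih fuel (sel ++ [u]) (ban + 1) mn (by omega) (by omega) hd' (by simpa using Nat.lt_of_succ_lt_succ hf)
      show (if ban = (mn.length : Int) then _ else _) = _
      rw [if_neg hban, hget]
      simp only [hrec]
      have hl := pv_loop g sel (fun u => (pvProd (sel ++ [u]) gs).map (fun p => PySem.List.sorted p (fun x => x) false)) []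
      simp only [List.nil_append] at hl
      rw [show (PySem.Set.empty : PySem.Set (List String)) = PySem.Set.ofList [] from rfl, hl]
      simp [pvProd, List.map_flatMap]

theorem pv_B_fold (gs : List (List String)) : ∀ (ps : List (List String)),
    gs.foldl (fun ps group => ps.flatMap (fun p => (group.filter (fun u => !p.contains u)).map (fun u => p ++ [u]))) ps
    = ps.flatMap (fun p => pvProd p gs) := by
  induction gs with
  | nil => intro ps; simp [pvProd]
  | cons g gs ih =>
    intro ps
    simp only [List.foldl_cons, ih, pvProd]
    simp [List.flatMap_assoc, List.flatMap_map]

-- ===== VERDICT (by name: the statement is the Claim_ definition above) =====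
theorem select_user_spec : Claim_equal_select_user := by
  intro sel ban mn _ hpre
  obtain ⟨h0, h1⟩ := hpre
  unfold Spec_select_user select_user select_user_alt
  simp only [PySem.List.slice_from (xs := mn) h0, pv_B_fold, List.flatMap_cons,
    List.flatMap_nil, List.append_nil]
  rw [pv_A_char (mn.drop ban.toNat) _ sel ban mn h0 h1 rfl (by
    have := List.length_drop (l := mn) (i := ban.toNat); omega)]
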